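-- pv_equiv track=rewrite | github.com/mike-burl/advent-of-code-2021 | day 17/trickShot.py | getMinimumX
-- ===== SOURCE A (Python) =====
-- def getMinimumX(xPos):
--     x = 1
--     xPotential = 0
--     xPosReached = False
--     while not xPosReached:
--         xPotential += x
--         if xPotential > xPos:
--             return x
--         x += 1
-- ===== SOURCE B (Python) =====
-- def getMinimumX(xPos):
--     # Binary search for the least x >= 1 with x*(x+1)//2 > xPos.
--     if xPos < 1:
--         return 1
--     lo, hi = 1, xPos + 1
--     while lo < hi:
--         mid = (lo + hi) // 2
--         if mid * (mid + 1) // 2 > xPos: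
--             hi = mid
--         else:
--             lo = mid + 1
--     return lo
-- ===== Notes on version B (the rewrite author's own statement) =====
-- stated objective: faster
-- what changed: Replaced the linear scan accumulating triangular sums with a binary search over x using the closed-form triangular value x*(x+1)//2.
import Mathlib
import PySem

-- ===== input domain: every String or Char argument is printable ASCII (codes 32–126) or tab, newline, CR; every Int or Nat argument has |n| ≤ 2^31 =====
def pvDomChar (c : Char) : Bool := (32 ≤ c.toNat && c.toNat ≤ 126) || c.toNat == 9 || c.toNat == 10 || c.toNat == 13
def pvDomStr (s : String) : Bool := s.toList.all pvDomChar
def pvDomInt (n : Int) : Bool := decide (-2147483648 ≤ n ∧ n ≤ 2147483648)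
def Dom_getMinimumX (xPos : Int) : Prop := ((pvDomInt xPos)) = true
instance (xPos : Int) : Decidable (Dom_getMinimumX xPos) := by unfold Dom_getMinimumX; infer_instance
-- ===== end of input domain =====

-- B replaces A's linear scan over triangular sums by a binary search using the
-- closed-form x*(x+1)//2 (objective: faster).

-- ===== PORT A =====
-- A's while loop; Python's x is (n:Int)+1 (n counts completed iterations),
-- xPot the running xPotential after 'xPotential += x' is written inline.
def getMinimumXLoop (xPos : Int) (n : Nat) (xPot : Int) : Int :=
  if xPot + ((n : Int) + 1) > xPos then (n : Int) + 1
  else getMinimumXLoop xPos (n + 1) (xPot + ((n : Int) + 1))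
termination_by (xPos - xPot).toNat
decreasing_by
  simp only [not_lt] at *
  omega

def getMinimumX (xPos : Int) : Int := getMinimumXLoop xPos 0 0

-- ===== PORT B =====
-- Source B's while loop; Python's local 'mid' = (lo+hi)//2 is written inline.
def getMinimumXAltLoop (xPos lo hi : Int) : Int :=
  if lo < hi then
    if PySem.Int.floordiv
        (PySem.Int.floordiv (lo + hi) 2 * (PySem.Int.floordiv (lo + hi) 2 + 1)) 2 > xPos then
      getMinimumXAltLoop xPos lo (PySem.Int.floordiv (lo + hi) 2)
    else
      getMinimumXAltLoop xPos (PySem.Int.floordiv (lo + hi) 2 + 1) hi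
  else lo
termination_by (hi - lo).toNat
decreasing_by
  all_goals
    have he : PySem.Int.floordiv (lo + hi) 2 = (lo + hi) / 2 :=
      PySem.Int.floordiv_eq_ediv_of_pos (by omega)
    omega

def getMinimumX_alt (xPos : Int) : Int :=
  if xPos < 1 then 1
  else getMinimumXAltLoop xPos 1 (xPos + 1)

-- ===== PRECONDITION & SPEC =====
def Spec_getMinimumX (xPos : Int) (out : Int) : Prop := out = getMinimumX_alt xPos
instance (xPos : Int) (out : Int) : Decidable (Spec_getMinimumX xPos out) := by unfold Spec_getMinimumX; infer_instance

-- ===== CLAIM (what is proved, stated in full; the proofs are below) =====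
def Claim_equal_getMinimumX : Prop := ∀ (xPos : Int), Dom_getMinimumX xPos → Spec_getMinimumX xPos (getMinimumX xPos)

-- ===== LEMMAS AND PROOFS =====

-- triangular number T(n) = n*(n+1)/2 (Int division; the product is even)
def tri (n : Int) : Int := n * (n + 1) / 2

lemma two_tri (n : Int) : 2 * tri n = n * (n + 1) := by
  unfold tri
  have h : (2 : Int) ∣ n * (n + 1) := Int.even_mul_succ_self n |>.two_dvd
  omega

lemma tri_succ (n : Int) : tri (n + 1) = tri n + (n + 1) := by
  have h1 := two_tri n
  have h2 := two_tri (n + 1)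
  nlinarith

lemma tri_mono {a b : Int} (ha : 0 ≤ a) (hab : a ≤ b) : tri a ≤ tri b := by
  have h1 := two_tri a
  have h2 := two_tri b
  nlinarith

-- the three properties pin the answer uniquely
lemma tri_unique {xPos m m' : Int}
    (hm1 : 1 ≤ m) (hm2 : xPos < tri m) (hm3 : tri (m - 1) ≤ xPos)
    (hn1 : 1 ≤ m') (hn2 : xPos < tri m') (hn3 : tri (m' - 1) ≤ xPos) : m = m' := by
  by_contra hne
  rcases lt_or_gt_of_ne hne with h | h
  · have := tri_mono (a := m) (b := m' - 1) (by omega) (by omega); omega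
  · have := tri_mono (a := m') (b := m - 1) (by omega) (by omega); omega

-- A's loop, entered with xPot = tri n and tri n ≤ xPos, returns the unique answer
lemma loopA_char (xPos : Int) :
    ∀ (k : Nat) (n : Nat), (xPos - tri n).toNat ≤ k → tri (n : Int) ≤ xPos →
      1 ≤ getMinimumXLoop xPos n (tri n) ∧
      xPos < tri (getMinimumXLoop xPos n (tri n)) ∧
      tri (getMinimumXLoop xPos n (tri n) - 1) ≤ xPos := by
  intro k
  induction k with
  | zero =>
    intro n hk hn
    have hs : tri ((n : Int) + 1) = tri n + ((n : Int) + 1) := tri_succ n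
    have h0 : (0 : Int) ≤ n := Int.natCast_nonneg n
    have hgt : tri (n : Int) + ((n : Int) + 1) > xPos := by omega
    rw [getMinimumXLoop, if_pos hgt]
    refine ⟨by omega, by omega, ?_⟩
    rw [show ((n : Int) + 1 - 1) = (n : Int) by ring]
    exact hn
  | succ k ih =>
    intro n hk hn
    have hs : tri ((n : Int) + 1) = tri n + ((n : Int) + 1) := tri_succ n
    have h0 : (0 : Int) ≤ n := Int.natCast_nonneg n
    by_cases hgt : tri (n : Int) + ((n : Int) + 1) > xPos
    · rw [getMinimumXLoop, if_pos hgt]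
      refine ⟨by omega, by omega, ?_⟩
      rw [show ((n : Int) + 1 - 1) = (n : Int) by ring]
      exact hn
    · rw [getMinimumXLoop, if_neg hgt]
      have hcast : tri (n : Int) + ((n : Int) + 1) = tri ((n + 1 : Nat) : Int) := by
        push_cast; omega
      rw [hcast]
      exact ih (n + 1) (by push_cast at hcast ⊢; omega) (by omega)

-- B's loop maintains: 1 ≤ lo ≤ hi, tri hi > xPos, tri (lo-1) ≤ xPos
lemma loopB_char (xPos : Int) :
    ∀ (k : Nat) (lo hi : Int), (hi - lo).toNat ≤ k →
      1 ≤ lo → lo ≤ hi → xPos < tri hi → tri (lo - 1) ≤ xPos →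
      1 ≤ getMinimumXAltLoop xPos lo hi ∧
      xPos < tri (getMinimumXAltLoop xPos lo hi) ∧
      tri (getMinimumXAltLoop xPos lo hi - 1) ≤ xPos := by
  intro k
  induction k with
  | zero =>
    intro lo hi hk h1 h2 h3 h4
    have heq : lo = hi := by omega
    subst heq
    rw [getMinimumXAltLoop, if_neg (lt_irrefl _)]
    exact ⟨by omega, h3, h4⟩
  | succ k ih =>
    intro lo hi hk h1 h2 h3 h4
    by_cases hlt : lo < hi
    · have he : PySem.Int.floordiv (lo + hi) 2 = (lo + hi) / 2 :=
        PySem.Int.floordiv_eq_ediv_of_pos (by omega)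
      have hmlo : lo ≤ PySem.Int.floordiv (lo + hi) 2 := by omega
      have hmhi : PySem.Int.floordiv (lo + hi) 2 < hi := by omega
      have htri : PySem.Int.floordiv
          (PySem.Int.floordiv (lo + hi) 2 * (PySem.Int.floordiv (lo + hi) 2 + 1)) 2
          = tri (PySem.Int.floordiv (lo + hi) 2) := by
        rw [PySem.Int.floordiv_eq_ediv_of_pos (by omega)]; rfl
      by_cases hbr : tri (PySem.Int.floordiv (lo + hi) 2) > xPos
      · rw [getMinimumXAltLoop, if_pos hlt, if_pos (by rw [htri]; exact hbr)]
        exact ih lo _ (by omega) h1 (by omega) hbr h4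
      · rw [getMinimumXAltLoop, if_pos hlt, if_neg (by rw [htri]; exact hbr)]
        refine ih _ hi (by omega) (by omega) (by omega) h3 ?_
        rw [show (PySem.Int.floordiv (lo + hi) 2 + 1 - 1) = PySem.Int.floordiv (lo + hi) 2
          by ring]
        omega
    · have heq : lo = hi := by omega
      subst heq
      rw [getMinimumXAltLoop, if_neg (lt_irrefl _)]
      exact ⟨by omega, h3, h4⟩

theorem getMinimumX_eq (xPos : Int) : getMinimumX xPos = getMinimumX_alt xPos := by
  unfold getMinimumX getMinimumX_alt
  by_cases hx : xPos < 1
  · rw [getMinimumXLoop, if_pos (by push_cast; omega), if_pos hx]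
    norm_num
  · rw [if_neg hx]
    have htri0 : tri ((0 : Nat) : Int) = 0 := by unfold tri; norm_num
    have hA := loopA_char xPos (xPos - tri 0).toNat 0 (le_refl _) (by rw [htri0]; omega)
    have hz : tri ((0 : Nat) : Int) = (0 : Int) := htri0
    rw [show getMinimumXLoop xPos 0 0 = getMinimumXLoop xPos 0 (tri ((0:Nat):Int)) by rw [hz]]
    have hhi : xPos < tri (xPos + 1) := by
      have := two_tri (xPos + 1); nlinarith
    have hlo : tri ((1 : Int) - 1) ≤ xPos := by
      norm_num [tri]; omega
    have hB := loopB_char xPos (xPos + 1 - 1).toNat 1 (xPos + 1) (le_refl _)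
      (by omega) (by omega) hhi hlo
    exact tri_unique hA.1 hA.2.1 hA.2.2 hB.1 hB.2.1 hB.2.2

-- ===== VERDICT (by name: the statement is the Claim_ definition above) =====
theorem getMinimumX_spec : Claim_equal_getMinimumX := by
  intro xPos _
  unfold Spec_getMinimumX
  exact getMinimumX_eq xPos
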